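-- pv_equiv track=rewrite | github.com/MarcinSerafin03/bit-algo-start-24-25-WDI | Zestaw 2/51.py | num_to_table
-- ===== SOURCE A (Python) =====
-- def num_to_table(n, l):
--     table = [0] * l
--     index = l - 1
--     while n > 0:
--         table[index] = n % 10
--         n //= 10
--         index -= 1
--
--     return table
-- ===== SOURCE B (Python) =====
-- def num_to_table(n, l):
--     table = [0] * l
--     if n > 0:
--         for i, ch in enumerate(reversed(str(n))):
--             table[l - 1 - i] = int(ch)
--     return table
-- ===== Notes on version B (the rewrite author's own statement) =====
-- stated objective: idiomatic
-- what changed: B converts the number to its decimal string and writes int(ch) per position via enumerate(reversed(str(n))) instead of A's arithmetic while-loop extracting digits with % and //=.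
import Mathlib
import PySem

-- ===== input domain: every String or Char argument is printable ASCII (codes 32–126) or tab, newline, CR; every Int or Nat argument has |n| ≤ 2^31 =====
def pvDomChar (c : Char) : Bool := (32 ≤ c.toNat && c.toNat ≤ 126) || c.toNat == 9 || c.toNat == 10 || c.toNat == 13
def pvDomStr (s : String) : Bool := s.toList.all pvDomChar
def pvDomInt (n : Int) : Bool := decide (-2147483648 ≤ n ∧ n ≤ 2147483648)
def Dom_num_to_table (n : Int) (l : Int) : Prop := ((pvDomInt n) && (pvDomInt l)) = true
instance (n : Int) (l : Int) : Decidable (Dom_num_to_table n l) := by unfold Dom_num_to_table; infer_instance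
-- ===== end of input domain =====

-- B replaces the arithmetic extraction loop by converting the number to its decimal
-- string and writing one digit per position (idiomatic; same negative-index writes as A).

-- ===== PORT A =====
-- while n > 0: table[index] = n % 10; n //= 10; index -= 1
-- (table[index] = … ported as pySetD: total form, exact under Pre_'s in-range guarantee)
def numToTableLoop (table : List Int) (n : Int) (index : Int) : List Int :=
  if h : 0 < n then
    numToTableLoop (PySem.List.pySetD table index (PySem.Int.mod n 10))
      (PySem.Int.floordiv n 10) (index - 1)
  else table
termination_by n.toNat
decreasing_by
  rw [PySem.Int.floordiv_eq_ediv_of_pos (by omega)]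
  omega

def num_to_table (n : Int) (l : Int) : List Int :=
  numToTableLoop (PySem.List.pyRepeat [(0 : Int)] l) n (l - 1)

-- ===== PORT B =====
def num_to_table_alt (n : Int) (l : Int) : List Int :=
  let table := PySem.List.pyRepeat [(0 : Int)] l
  if 0 < n then
    (PySem.List.enumerate (PySem.Int.toChars n).reverse 0).foldl
      (fun t p => PySem.List.pySetD t (l - 1 - p.1) ((PySem.Int.ofChars? [p.2]).getD 0))
      table
  else table

-- ===== PRECONDITION & SPEC =====
-- Pre_ excludes exactly the inputs where the Python A raises IndexError (and B raises at
-- the same point): n > 0 with a non-positive length, or n with more than 2*l decimal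
-- digits, where the write index falls below -l.
def Pre_num_to_table (n : Int) (l : Int) : Prop :=
  n ≤ 0 ∨ (1 ≤ l ∧ n < 10 ^ (2 * l).toNat)
instance (n : Int) (l : Int) : Decidable (Pre_num_to_table n l) := by
  unfold Pre_num_to_table; infer_instance

def pvWitness_num_to_table : Int × Int := (123, 5)

def Spec_num_to_table (n : Int) (l : Int) (out : List Int) : Prop := out = num_to_table_alt n l
instance (n : Int) (l : Int) (out : List Int) : Decidable (Spec_num_to_table n l out) := by unfold Spec_num_to_table; infer_instance

-- ===== CLAIM (what is proved, stated in full; the proofs are below) =====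
def Claim_equal_num_to_table : Prop := ∀ (n : Int) (l : Int), Dom_num_to_table n l → Pre_num_to_table n l → Spec_num_to_table n l (num_to_table n l)

-- ===== LEMMAS AND PROOFS =====

-- reversed digit values of a natural number, least significant first (proof-side helper)
def digitsRev (m : Nat) : List Nat :=
  if m = 0 then [] else m % 10 :: digitsRev (m / 10)

theorem digitsRev_pos (m : Nat) (h : m ≠ 0) :
    digitsRev m = m % 10 :: digitsRev (m / 10) := by
  rw [digitsRev, if_neg h]

theorem digitsRev_zero : digitsRev 0 = [] := by
  rw [digitsRev]; rfl

theorem digitsRev_toDigits (m : Nat) (hm : 0 < m) :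
    (Nat.toDigits 10 m).reverse = (digitsRev m).map Nat.digitChar := by
  induction m using Nat.strong_induction_on with
  | _ m ih =>
    rw [Nat.toDigits_eq_if (by omega), digitsRev_pos m (by omega)]
    by_cases h : m < 10
    · rw [if_pos h, show m / 10 = 0 from by omega, digitsRev_zero]
      simp [Nat.mod_eq_of_lt h]
    · rw [if_neg h]
      simp [ih (m / 10) (by omega) (by omega)]

theorem ofChars_digitChar (d : Nat) (hd : d < 10) :
    (PySem.Int.ofChars? [Nat.digitChar d]).getD 0 = (d : Int) := by
  interval_cases d <;> decide

theorem mod_ten_pos (n : Int) (hn : 0 < n) :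
    PySem.Int.mod n 10 = ((n.toNat % 10 : Nat) : Int) := by
  have h : n = ((n.toNat : Nat) : Int) := by omega
  conv_lhs => rw [h]
  exact_mod_cast PySem.Int.mod_natCast n.toNat 10

theorem floordiv_ten_pos (n : Int) (hn : 0 < n) :
    PySem.Int.floordiv n 10 = ((n.toNat / 10 : Nat) : Int) := by
  have h : n = ((n.toNat : Nat) : Int) := by omega
  conv_lhs => rw [h]
  exact_mod_cast PySem.Int.floordiv_natCast n.toNat 10

-- The two loops perform the same sequence of writes.
theorem loop_eq_fold (m : Nat) : ∀ (n : Int), n.toNat = m → 0 < n →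
    ∀ (t : List Int) (j s : Int),
    numToTableLoop t n j =
      (PySem.List.enumerate ((digitsRev n.toNat).map Nat.digitChar) s).foldl
        (fun t p => PySem.List.pySetD t (j + s - p.1) ((PySem.Int.ofChars? [p.2]).getD 0))
        t := by
  induction m using Nat.strong_induction_on with
  | _ m ih =>
    intro n hnm hn t j s
    rw [numToTableLoop, dif_pos hn, digitsRev_pos _ (by omega)]
    rw [List.map_cons, PySem.List.enumerate_cons, List.foldl_cons]
    rw [ofChars_digitChar _ (Nat.mod_lt _ (by omega))]
    have hidx : j + s - s = j := by ring
    rw [hidx, ← mod_ten_pos n hn]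
    by_cases h0 : n.toNat / 10 = 0
    · rw [numToTableLoop, dif_neg (by rw [floordiv_ten_pos n hn, h0]; decide)]
      have : digitsRev (n.toNat / 10) = [] := by rw [h0]; exact digitsRev_zero
      rw [hnm] at this ⊢
      rw [this]
      simp
    · have hlt : n.toNat / 10 < m := by omega
      have hpos : 0 < PySem.Int.floordiv n 10 := by
        rw [floordiv_ten_pos n hn]; omega
      have htn : (PySem.Int.floordiv n 10).toNat = n.toNat / 10 := by
        rw [floordiv_ten_pos n hn]; omega
      have := ih (n.toNat / 10) hlt (PySem.Int.floordiv n 10) htn hpos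
        (PySem.List.pySetD t j (PySem.Int.mod n 10)) (j - 1) (s + 1)
      rw [htn] at this
      rw [this]
      congr 1
      funext t' p
      congr 1
      ring

-- ===== VERDICT (by name: the statement is the Claim_ definition above) =====
theorem num_to_table_spec : Claim_equal_num_to_table := by
  intro n l _ _
  unfold Spec_num_to_table num_to_table num_to_table_alt
  by_cases hn : 0 < n
  · rw [if_pos hn]
    have htc : (PySem.Int.toChars n).reverse = (digitsRev n.toNat).map Nat.digitChar := by
      rw [PySem.Int.toChars, if_neg (by omega)]
      exact digitsRev_toDigits n.toNat (by omega)
    rw [htc, loop_eq_fold n.toNat n rfl hn _ (l - 1) 0]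
    congr 1
    funext t p
    congr 1
    ring
  · rw [if_neg hn, numToTableLoop, dif_neg hn]
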